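-- pv_equiv track=rewrite | github.com/Balasubramanian-pg/Productized-Version | Final Output/CFO Dashboard/CFO Dashboard Dataset Generation.py | get_gl_account_details
-- ===== SOURCE A (Python) =====
-- GL_ACCOUNTS = {
--     "ASSET": {"range": (100000, 199999), "type": "Balance Sheet", "groups": {
--         "Cash": (100000, 109999), "Receivables": (110000, 119999), "Inventory": (120000, 129999),
--         "Fixed Assets Gross": (130000, 139999), "Accumulated Depreciation": (140000, 149999),
--         "Other Current Assets": (150000, 159999), "Other Non-Current Assets": (160000, 199999)
--     }},
--     "LIABILITY": {"range": (200000, 299999), "type": "Balance Sheet", "groups": {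
--         "Payables": (200000, 209999), "Short-Term Debt": (210000, 219999), "Accrued Expenses": (220000, 229999),
--         "Long-Term Debt": (230000, 239999), "Other Liabilities": (240000, 299999)
--     }},
--     "EQUITY": {"range": (300000, 399999), "type": "Balance Sheet", "groups": {
--         "Share Capital": (300000, 309999), "Retained Earnings": (310000, 319999)
--     }},
--     "REVENUE": {"range": (400000, 499999), "type": "P&L", "groups": {
--         "Sales Revenue": (400000, 409999), "Other Revenue": (410000, 499999)
--     }},
--     "EXPENSE": {"range": (500000, 699999), "type": "P&L", "groups": {
--         "COGS": (500000, 509999), "Operating Expenses": (510000, 599999),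
--         "Depreciation Expense": (600000, 609999), "Interest Expense": (610000, 619999),
--         "Tax Expense": (620000, 629999), "Other Expenses": (630000, 699999)
--     }}
-- }
--
-- def get_gl_account_details(gl_account_num):
--     """Returns the account group and type for a given GL account number."""
--     for group, details in GL_ACCOUNTS.items():
--         start, end = details["range"]
--         if start <= gl_account_num <= end:
--             for sub_group, sub_range in details["groups"].items():
--                 if sub_range[0] <= gl_account_num <= sub_range[1]:
--                     return sub_group, details["type"]
--     return "Unknown", "Unknown"
-- ===== SOURCE B (Python) =====
-- # Flat lookup table: one row per subgroup, tagged with its parent account's type.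
-- _FLAT_GL_TABLE = [
--     (100000, 109999, "Cash", "Balance Sheet"),
--     (110000, 119999, "Receivables", "Balance Sheet"),
--     (120000, 129999, "Inventory", "Balance Sheet"),
--     (130000, 139999, "Fixed Assets Gross", "Balance Sheet"),
--     (140000, 149999, "Accumulated Depreciation", "Balance Sheet"),
--     (150000, 159999, "Other Current Assets", "Balance Sheet"),
--     (160000, 199999, "Other Non-Current Assets", "Balance Sheet"),
--     (200000, 209999, "Payables", "Balance Sheet"),
--     (210000, 219999, "Short-Term Debt", "Balance Sheet"),
--     (220000, 229999, "Accrued Expenses", "Balance Sheet"),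
--     (230000, 239999, "Long-Term Debt", "Balance Sheet"),
--     (240000, 299999, "Other Liabilities", "Balance Sheet"),
--     (300000, 309999, "Share Capital", "Balance Sheet"),
--     (310000, 319999, "Retained Earnings", "Balance Sheet"),
--     (400000, 409999, "Sales Revenue", "P&L"),
--     (410000, 499999, "Other Revenue", "P&L"),
--     (500000, 509999, "COGS", "P&L"),
--     (510000, 599999, "Operating Expenses", "P&L"),
--     (600000, 609999, "Depreciation Expense", "P&L"),
--     (610000, 619999, "Interest Expense", "P&L"),
--     (620000, 629999, "Tax Expense", "P&L"),
--     (630000, 699999, "Other Expenses", "P&L"),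
-- ]
--
-- def get_gl_account_details(gl_account_num):
--     """Returns the account group and type for a given GL account number."""
--     for start, end, sub_group, acct_type in _FLAT_GL_TABLE:
--         if start <= gl_account_num <= end:
--             return sub_group, acct_type
--     return "Unknown", "Unknown"
-- ===== Notes on version B (the rewrite author's own statement) =====
-- stated objective: simpler
-- what changed: Replaced the nested two-level scan over the GL_ACCOUNTS dict (top-level range check, then subgroup scan) with a single linear scan over one precomputed flat table of (start, end, subgroup, type) rows.
import Mathlib
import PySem

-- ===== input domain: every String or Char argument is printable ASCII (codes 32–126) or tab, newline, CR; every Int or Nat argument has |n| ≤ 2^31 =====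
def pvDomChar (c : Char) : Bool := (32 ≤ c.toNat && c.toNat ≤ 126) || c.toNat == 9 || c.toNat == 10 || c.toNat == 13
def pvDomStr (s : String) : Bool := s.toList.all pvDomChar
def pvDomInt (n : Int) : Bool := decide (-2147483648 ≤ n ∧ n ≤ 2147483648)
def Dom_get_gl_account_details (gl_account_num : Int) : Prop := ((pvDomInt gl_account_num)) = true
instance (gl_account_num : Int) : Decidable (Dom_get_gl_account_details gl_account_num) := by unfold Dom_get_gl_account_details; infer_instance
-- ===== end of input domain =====

-- B replaces A's nested two-level dict scan with one linear scan over a flat table; objective: simpler.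

-- ===== PORT A =====
-- A's GL_ACCOUNTS dict in insertion order: (top range, type, subgroup list).
def pvGLAccounts : List ((Int × Int) × String × List (String × Int × Int)) :=
  [ ((100000, 199999), "Balance Sheet",
      [("Cash", 100000, 109999), ("Receivables", 110000, 119999), ("Inventory", 120000, 129999),
       ("Fixed Assets Gross", 130000, 139999), ("Accumulated Depreciation", 140000, 149999),
       ("Other Current Assets", 150000, 159999), ("Other Non-Current Assets", 160000, 199999)]),
    ((200000, 299999), "Balance Sheet",
      [("Payables", 200000, 209999), ("Short-Term Debt", 210000, 219999), ("Accrued Expenses", 220000, 229999),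
       ("Long-Term Debt", 230000, 239999), ("Other Liabilities", 240000, 299999)]),
    ((300000, 399999), "Balance Sheet",
      [("Share Capital", 300000, 309999), ("Retained Earnings", 310000, 319999)]),
    ((400000, 499999), "P&L",
      [("Sales Revenue", 400000, 409999), ("Other Revenue", 410000, 499999)]),
    ((500000, 699999), "P&L",
      [("COGS", 500000, 509999), ("Operating Expenses", 510000, 599999),
       ("Depreciation Expense", 600000, 609999), ("Interest Expense", 610000, 619999),
       ("Tax Expense", 620000, 629999), ("Other Expenses", 630000, 699999)]) ]

-- inner loop of A: first subgroup whose range contains n (returning = first match wins)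
def pvInnerScan (n : Int) (groups : List (String × Int × Int)) : Option String :=
  groups.foldr (fun g acc => if g.2.1 ≤ n ∧ n ≤ g.2.2 then some g.1 else acc) none

-- outer loop of A: if the top range matches, scan subgroups; if the inner loop finds nothing, continue
def pvOuterScan (n : Int) (tbl : List ((Int × Int) × String × List (String × Int × Int))) : String × String :=
  tbl.foldr
    (fun e acc =>
      if e.1.1 ≤ n ∧ n ≤ e.1.2 then
        match pvInnerScan n e.2.2 with
        | some name => (name, e.2.1)
        | none => acc
      else acc)
    ("Unknown", "Unknown")

def get_gl_account_details (gl_account_num : Int) : String × String :=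
  pvOuterScan gl_account_num pvGLAccounts

-- ===== PORT B =====
-- B's flat table: one row (start, end, subgroup, type) per subgroup.
def pvFlatGLTable : List (Int × Int × String × String) :=
  [ (100000, 109999, "Cash", "Balance Sheet"),
    (110000, 119999, "Receivables", "Balance Sheet"),
    (120000, 129999, "Inventory", "Balance Sheet"),
    (130000, 139999, "Fixed Assets Gross", "Balance Sheet"),
    (140000, 149999, "Accumulated Depreciation", "Balance Sheet"),
    (150000, 159999, "Other Current Assets", "Balance Sheet"),
    (160000, 199999, "Other Non-Current Assets", "Balance Sheet"),
    (200000, 209999, "Payables", "Balance Sheet"),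
    (210000, 219999, "Short-Term Debt", "Balance Sheet"),
    (220000, 229999, "Accrued Expenses", "Balance Sheet"),
    (230000, 239999, "Long-Term Debt", "Balance Sheet"),
    (240000, 299999, "Other Liabilities", "Balance Sheet"),
    (300000, 309999, "Share Capital", "Balance Sheet"),
    (310000, 319999, "Retained Earnings", "Balance Sheet"),
    (400000, 409999, "Sales Revenue", "P&L"),
    (410000, 499999, "Other Revenue", "P&L"),
    (500000, 509999, "COGS", "P&L"),
    (510000, 599999, "Operating Expenses", "P&L"),
    (600000, 609999, "Depreciation Expense", "P&L"),
    (610000, 619999, "Interest Expense", "P&L"),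
    (620000, 629999, "Tax Expense", "P&L"),
    (630000, 699999, "Other Expenses", "P&L") ]

def pvFlatScan (n : Int) (tbl : List (Int × Int × String × String)) : String × String :=
  tbl.foldr (fun r acc => if r.1 ≤ n ∧ n ≤ r.2.1 then (r.2.2.1, r.2.2.2) else acc)
    ("Unknown", "Unknown")

def get_gl_account_details_alt (gl_account_num : Int) : String × String :=
  pvFlatScan gl_account_num pvFlatGLTable

-- ===== PRECONDITION & SPEC =====
def Spec_get_gl_account_details (gl_account_num : Int) (out : String × String) : Prop := out = get_gl_account_details_alt gl_account_num
instance (gl_account_num : Int) (out : String × String) : Decidable (Spec_get_gl_account_details gl_account_num out) := by unfold Spec_get_gl_account_details; infer_instance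

-- ===== CLAIM (what is proved, stated in full; the proofs are below) =====
def Claim_equal_get_gl_account_details : Prop := ∀ (gl_account_num : Int), Dom_get_gl_account_details gl_account_num → Spec_get_gl_account_details gl_account_num (get_gl_account_details gl_account_num)

-- ===== LEMMAS AND PROOFS =====

-- flatten A's table the way B's flat table was written down
def pvFlatten (tbl : List ((Int × Int) × String × List (String × Int × Int))) :
    List (Int × Int × String × String) :=
  tbl.flatMap (fun e => e.2.2.map (fun g => (g.2.1, g.2.2, g.1, e.2.1)))

theorem pv_inner_cons (n : Int) (g : String × Int × Int) (gs : List (String × Int × Int)) :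
    pvInnerScan n (g :: gs) =
      if g.2.1 ≤ n ∧ n ≤ g.2.2 then some g.1 else pvInnerScan n gs := rfl

theorem pv_flat_cons (n : Int) (x : Int × Int × String × String)
    (l : List (Int × Int × String × String)) :
    pvFlatScan n (x :: l) =
      if x.1 ≤ n ∧ n ≤ x.2.1 then (x.2.2.1, x.2.2.2) else pvFlatScan n l := rfl

theorem pv_outer_cons (n : Int) (e : (Int × Int) × String × List (String × Int × Int))
    (rest : List ((Int × Int) × String × List (String × Int × Int))) :
    pvOuterScan n (e :: rest) =
      if e.1.1 ≤ n ∧ n ≤ e.1.2 then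
        match pvInnerScan n e.2.2 with
        | some name => (name, e.2.1)
        | none => pvOuterScan n rest
      else pvOuterScan n rest := rfl

-- if the inner scan finds nothing, the corresponding flat rows all fail too
theorem pv_skip (n : Int) (ty : String) (groups : List (String × Int × Int))
    (rest : List (Int × Int × String × String))
    (h : pvInnerScan n groups = none) :
    pvFlatScan n (groups.map (fun g => (g.2.1, g.2.2, g.1, ty)) ++ rest) =
      pvFlatScan n rest := by
  induction groups with
  | nil => rfl
  | cons g gs ih =>
    rw [pv_inner_cons] at h
    simp only [List.map_cons, List.cons_append, pv_flat_cons]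
    by_cases c : g.2.1 ≤ n ∧ n ≤ g.2.2
    · rw [if_pos c] at h; cases h
    · rw [if_neg c] at h
      rw [if_neg c]
      exact ih h

-- if the inner scan finds a subgroup, the flat scan finds the same row first
theorem pv_find (n : Int) (ty : String) (groups : List (String × Int × Int))
    (rest : List (Int × Int × String × String)) (name : String)
    (h : pvInnerScan n groups = some name) :
    pvFlatScan n (groups.map (fun g => (g.2.1, g.2.2, g.1, ty)) ++ rest) = (name, ty) := by
  induction groups with
  | nil => cases h
  | cons g gs ih =>
    rw [pv_inner_cons] at h
    simp only [List.map_cons, List.cons_append, pv_flat_cons]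
    by_cases c : g.2.1 ≤ n ∧ n ≤ g.2.2
    · rw [if_pos c] at h
      rw [if_pos c]
      cases h; rfl
    · rw [if_neg c] at h
      rw [if_neg c]
      exact ih h

-- a number outside the top-level band matches no subgroup of that band
theorem pv_inner_none_of_out (n lo hi : Int) (groups : List (String × Int × Int))
    (hw : ∀ g ∈ groups, lo ≤ g.2.1 ∧ g.2.2 ≤ hi) (hn : ¬(lo ≤ n ∧ n ≤ hi)) :
    pvInnerScan n groups = none := by
  induction groups with
  | nil => rfl
  | cons g gs ih =>
    rw [pv_inner_cons]
    have hg := hw g (List.mem_cons_self ..)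
    rw [if_neg (by omega)]
    exact ih fun g' hg' => hw g' (List.mem_cons_of_mem _ hg')

-- the nested scan equals the flat scan of the flattened table,
-- provided every subgroup range lies within its parent band
theorem pv_main (n : Int) (tbl : List ((Int × Int) × String × List (String × Int × Int)))
    (hw : ∀ e ∈ tbl, ∀ g ∈ e.2.2, e.1.1 ≤ g.2.1 ∧ g.2.2 ≤ e.1.2) :
    pvOuterScan n tbl = pvFlatScan n (pvFlatten tbl) := by
  induction tbl with
  | nil => rfl
  | cons e rest ih =>
    have hw_e : ∀ g ∈ e.2.2, e.1.1 ≤ g.2.1 ∧ g.2.2 ≤ e.1.2 :=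
      fun g hg => hw e (List.mem_cons_self ..) g hg
    have hw_rest := fun e' he' => hw e' (List.mem_cons_of_mem _ he')
    have hrest := ih hw_rest
    simp only [pvFlatten, List.flatMap_cons] at *
    rw [pv_outer_cons]
    by_cases c : e.1.1 ≤ n ∧ n ≤ e.1.2
    · rw [if_pos c]
      cases hin : pvInnerScan n e.2.2 with
      | none => rw [pv_skip n e.2.1 e.2.2 _ hin]; exact hrest
      | some name => rw [pv_find n e.2.1 e.2.2 _ name hin]
    · rw [if_neg c]
      rw [pv_skip n e.2.1 e.2.2 _ (pv_inner_none_of_out n e.1.1 e.1.2 e.2.2 hw_e c)]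
      exact hrest

-- ===== VERDICT (by name: the statement is the Claim_ definition above) =====
theorem get_gl_account_details_spec : Claim_equal_get_gl_account_details := by
  intro n _
  unfold Spec_get_gl_account_details get_gl_account_details get_gl_account_details_alt
  rw [pv_main n pvGLAccounts (by decide)]
  rfl
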